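-- pv_equiv track=rewrite | github.com/OHA2025g/MP_VISION_Project | backend/server.py | normalize_sectors_list
-- ===== SOURCE A (Python) =====
-- from typing import List, Optional, Dict, Any, Set
--
-- CANONICAL_SECTOR_CODES = (
--     "AGR", "ECO", "EDU", "ENV", "GOV", "IND", "INF", "HLT", "SOC", "PMU",
-- )
--
-- def normalize_sectors_list(sectors: List[Dict[str, Any]]) -> List[Dict[str, Any]]:
--     """One row per sector code; stable order for UI after mongorestore/merge duplicates."""
--     by_code: Dict[str, Dict[str, Any]] = {}
--     for s in sectors:
--         code = (s.get("code") or "").strip().upper()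
--         if not code:
--             continue
--         if code not in by_code:
--             by_code[code] = s
--     rank = {c: i for i, c in enumerate(CANONICAL_SECTOR_CODES)}
--
--     def sort_key(doc: Dict[str, Any]) -> tuple:
--         c = (doc.get("code") or "").strip().upper()
--         return (rank.get(c, 999), c)
--
--     return sorted(by_code.values(), key=sort_key)
-- ===== SOURCE B (Python) =====
-- CANONICAL_SECTOR_CODES = (
--     "AGR", "ECO", "EDU", "ENV", "GOV", "IND", "INF", "HLT", "SOC", "PMU",
-- )
--
-- def normalize_sectors_list(sectors):
--     """One row per sector code: dedupe on the normalized code (first occurrence wins),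
--     then emit canonical codes in their fixed order followed by the remaining codes
--     sorted alphabetically -- no global sort needed."""
--     by_code = {}
--     for s in sectors:
--         code = (s.get("code") or "").strip().upper()
--         if code and code not in by_code:
--             by_code[code] = s
--     result = []
--     for c in CANONICAL_SECTOR_CODES:
--         if c in by_code:
--             result.append(by_code[c])
--     for c in sorted(c for c in by_code if c not in CANONICAL_SECTOR_CODES):
--         result.append(by_code[c])
--     return result
-- ===== Notes on version B (the rewrite author's own statement) =====
-- stated objective: idiomatic
-- what changed: Replaces A's global sorted() with a (rank, code) tuple key by a direct ordered walk over CANONICAL_SECTOR_CODES (emitting present entries in canonical order) followed by an alphabetical sort of only the non-canonical leftovers.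
import Mathlib
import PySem

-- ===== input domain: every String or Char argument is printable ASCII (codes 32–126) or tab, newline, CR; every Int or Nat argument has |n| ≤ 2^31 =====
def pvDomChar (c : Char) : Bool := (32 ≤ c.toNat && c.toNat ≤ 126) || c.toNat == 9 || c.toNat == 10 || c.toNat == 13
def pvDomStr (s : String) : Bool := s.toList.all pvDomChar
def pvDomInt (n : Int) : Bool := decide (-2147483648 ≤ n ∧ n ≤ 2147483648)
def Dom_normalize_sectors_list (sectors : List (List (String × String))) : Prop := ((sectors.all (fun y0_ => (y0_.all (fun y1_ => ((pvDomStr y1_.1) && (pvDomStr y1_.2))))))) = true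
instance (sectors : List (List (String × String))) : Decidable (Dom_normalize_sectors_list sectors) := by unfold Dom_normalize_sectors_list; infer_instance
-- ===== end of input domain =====

-- B replaces A's single global sorted() with a (rank, code) key by an ordered walk over the
-- canonical codes followed by an alphabetical sort of only the non-canonical leftovers.

-- shared module constant CANONICAL_SECTOR_CODES
def canonicalCodes : List String :=
  ["AGR", "ECO", "EDU", "ENV", "GOV", "IND", "INF", "HLT", "SOC", "PMU"]
-- (s.get("code") or "").strip().upper() — .get may return None (→ "") and 'or ""' only turns the
-- falsy string values None/"" into "", so '.getD ""' is exact here (all dict values are strings).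
def normCode (s : List (String × String)) : String :=
  PySem.Str.upper (PySem.Str.strip (((PySem.Dict.mk s).get? "code").getD ""))

-- ===== PORT A =====
def normalize_sectors_list (sectors : List (List (String × String))) : List (List (String × String)) :=
  let by_code : PySem.Dict String (List (String × String)) :=
    sectors.foldl (fun d s =>
      let code := normCode s
      if code = "" then d
      else if d.contains code then d
      else d.insert code s) PySem.Dict.empty
  let rank : PySem.Dict String Int :=
    (PySem.List.enumerate canonicalCodes 0).foldl (fun d p => d.insert p.2 p.1) PySem.Dict.empty
  PySem.List.sorted2 by_code.values
    (fun doc => rank.getD (normCode doc) 999) (fun doc => normCode doc) false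

-- ===== PORT B =====
def normalize_sectors_list_alt (sectors : List (List (String × String))) : List (List (String × String)) :=
  let by_code : PySem.Dict String (List (String × String)) :=
    sectors.foldl (fun d s =>
      let code := normCode s
      if code ≠ "" ∧ ¬ d.contains code then d.insert code s else d) PySem.Dict.empty
  let result := canonicalCodes.foldl
    (fun acc c => if by_code.contains c then acc ++ [by_code.getD c []] else acc) []
  let extras := PySem.List.sorted
    (by_code.keys.filter (fun c => !(canonicalCodes.contains c))) (fun c => c) false
  extras.foldl (fun acc c => acc ++ [by_code.getD c []]) result
-- ===== PRECONDITION & SPEC =====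
def Spec_normalize_sectors_list (sectors : List (List (String × String))) (out : List (List (String × String))) : Prop := out = normalize_sectors_list_alt sectors
instance (sectors : List (List (String × String))) (out : List (List (String × String))) : Decidable (Spec_normalize_sectors_list sectors out) := by unfold Spec_normalize_sectors_list; infer_instance

-- ===== CLAIM (what is proved, stated in full; the proofs are below) =====
def Claim_equal_normalize_sectors_list : Prop := ∀ (sectors : List (List (String × String))), Dom_normalize_sectors_list sectors → Spec_normalize_sectors_list sectors (normalize_sectors_list sectors)

-- ===== LEMMAS AND PROOFS =====

-- the deduplication dict both programs build (A's three-way branch ≡ B's combined condition)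
def buildDict (sectors : List (List (String × String))) : PySem.Dict String (List (String × String)) :=
  sectors.foldl (fun d s =>
    let code := normCode s
    if code = "" then d
    else if d.contains code then d
    else d.insert code s) PySem.Dict.empty

lemma build_loop_inv (l : List (List (String × String)))
    (d : PySem.Dict String (List (String × String)))
    (hnd : d.keys.Nodup) (hinv : ∀ p ∈ d.items, normCode p.2 = p.1 ∧ p.1 ≠ "") :
    (l.foldl (fun d s =>
      let code := normCode s
      if code = "" then d
      else if d.contains code then d
      else d.insert code s) d).keys.Nodup ∧
    ∀ p ∈ (l.foldl (fun d s =>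
      let code := normCode s
      if code = "" then d
      else if d.contains code then d
      else d.insert code s) d).items, normCode p.2 = p.1 ∧ p.1 ≠ "" := by
  induction l generalizing d with
  | nil => exact ⟨hnd, hinv⟩
  | cons s t ih =>
    simp only [List.foldl_cons]
    set c := normCode s with hc
    by_cases h1 : c = ""
    · simp only [h1, if_pos]
      exact ih d hnd hinv
    · by_cases h2 : d.contains c
      · simp only [if_neg h1, if_pos h2]
        exact ih d hnd hinv
      · simp only [if_neg h1, if_neg h2]
        refine ih _ (PySem.Dict.nodup_keys_insert d c s hnd) ?_
        intro p hp
        rcases (PySem.Dict.mem_items_insert d c s p).1 hp with h | ⟨h, _⟩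
        · subst h; exact ⟨hc.symm, h1⟩
        · exact hinv p h

-- A's rank dict {c: i for i, c in enumerate(CANONICAL_SECTOR_CODES)}
def rankDict : PySem.Dict String Int :=
  (PySem.List.enumerate canonicalCodes 0).foldl (fun d p => d.insert p.2 p.1) PySem.Dict.empty

lemma rankDict_lit : rankDict = PySem.Dict.mk
    [("AGR",0),("ECO",1),("EDU",2),("ENV",3),("GOV",4),("IND",5),("INF",6),("HLT",7),("SOC",8),("PMU",9)] := by
  decide

lemma rank_canon {k : String} (h : k ∈ canonicalCodes) : rankDict.getD k 999 < 999 := by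
  simp only [canonicalCodes, List.mem_cons, List.not_mem_nil, or_false] at h
  rcases h with h|h|h|h|h|h|h|h|h|h <;> subst h <;> decide

lemma rank_not_canon {k : String} (h : ¬ k ∈ canonicalCodes) : rankDict.getD k 999 = 999 := by
  simp only [canonicalCodes, List.mem_cons, List.not_mem_nil, or_false, not_or] at h
  obtain ⟨h1,h2,h3,h4,h5,h6,h7,h8,h9,h10⟩ := h
  rw [rankDict_lit]
  simp [PySem.Dict.getD_eq_get?_getD, PySem.Dict.get?,
    Ne.symm h1, Ne.symm h2, Ne.symm h3, Ne.symm h4, Ne.symm h5,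
    Ne.symm h6, Ne.symm h7, Ne.symm h8, Ne.symm h9, Ne.symm h10]

lemma canon_rank_pairwise :
    canonicalCodes.Pairwise (fun a b => rankDict.getD a 999 < rankDict.getD b 999) := by
  decide

lemma alt_fold_eq (sectors : List (List (String × String))) :
    sectors.foldl (fun d s =>
      let code := normCode s
      if code ≠ "" ∧ ¬ d.contains code then d.insert code s else d) PySem.Dict.empty
    = buildDict sectors := by
  unfold buildDict
  refine List.foldl_ext _ _ _ (fun d s _ => ?_)
  set c := normCode s with hc
  by_cases h1 : c = ""
  · simp [h1]
  · by_cases h2 : d.contains c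
    · simp [h1, h2]
    · simp [h1, h2]

lemma sorted2_eq_sorted_lex {α : Type} (xs : List α) (k1 : α → Int) (k2 : α → String) :
    PySem.List.sorted2 xs k1 k2 false
      = PySem.List.sorted xs (fun x => toLex (k1 x, k2 x)) false := by
  unfold PySem.List.sorted2 PySem.List.sorted
  simp only [Bool.false_eq_true, if_false]
  have : (fun a b => decide (k1 a < k1 b) || !decide (k1 b < k1 a) && decide (k2 a < k2 b))
      = (fun a b => decide ((toLex (k1 a, k2 a) : Int ×ₗ String) < toLex (k1 b, k2 b))) := by
    funext a b
    rw [Bool.eq_iff_iff]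
    simp only [Bool.or_eq_true, Bool.and_eq_true, Bool.not_eq_true', decide_eq_true_eq,
      decide_eq_false_iff_not, Prod.Lex.lt_iff, ofLex_toLex]
    constructor
    · rintro (h | ⟨h, h'⟩)
      · exact Or.inl h
      · by_cases h1 : k1 a < k1 b
        · exact Or.inl h1
        · exact Or.inr ⟨by omega, h'⟩
    · rintro (h | ⟨h, h'⟩)
      · exact Or.inl h
      · exact Or.inr ⟨by omega, h'⟩
  rw [this]

lemma alt_eq_maps (sectors : List (List (String × String))) :
    normalize_sectors_list_alt sectors =
    (canonicalCodes.filter (fun c => (buildDict sectors).contains c)).map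
        (fun c => (buildDict sectors).getD c [])
    ++ (PySem.List.sorted ((buildDict sectors).keys.filter
          (fun c => !(canonicalCodes.contains c))) (fun c => c) false).map
        (fun c => (buildDict sectors).getD c []) := by
  unfold normalize_sectors_list_alt
  rw [alt_fold_eq]
  rw [PySem.List.foldl_append_singleton_eq_map, PySem.List.foldl_append_if, List.nil_append]

theorem main_eq (sectors : List (List (String × String))) :
    normalize_sectors_list sectors = normalize_sectors_list_alt sectors := by
  obtain ⟨hnd, hinv⟩ := build_loop_inv sectors PySem.Dict.empty
    (by simp [PySem.Dict.empty, PySem.Dict.keys])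
    (by intro p hp; simp [PySem.Dict.empty] at hp)
  have hnd2 : (buildDict sectors).keys.Nodup := hnd
  have hinv2 : ∀ p ∈ (buildDict sectors).items, normCode p.2 = p.1 ∧ p.1 ≠ "" := hinv
  clear hnd hinv
  have hg : ∀ k ∈ (buildDict sectors).keys, normCode ((buildDict sectors).getD k []) = k := by
    intro k hk
    obtain ⟨p, hp, hpk⟩ := List.mem_map.1 hk
    obtain ⟨k', v⟩ := p
    cases hpk
    rw [PySem.Dict.getD_of_mem_items _ hp hnd2]
    exact (hinv2 _ hp).1
  have hA : normalize_sectors_list sectors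
      = PySem.List.sorted2 (buildDict sectors).values
          (fun doc => rankDict.getD (normCode doc) 999) (fun doc => normCode doc) false := rfl
  rw [hA, sorted2_eq_sorted_lex, alt_eq_maps]
  set d := buildDict sectors with hd
  set g : String → List (String × String) := fun c => d.getD c [] with hgdef
  set F := canonicalCodes.filter (fun c => d.contains c) with hF
  set S := PySem.List.sorted (d.keys.filter (fun c => !(canonicalCodes.contains c)))
      (fun c => c) false with hS
  have hFmem : ∀ a ∈ F, a ∈ canonicalCodes ∧ a ∈ d.keys := by
    intro a ha
    rw [hF, List.mem_filter] at ha
    exact ⟨ha.1, (PySem.Dict.contains_iff_mem_keys d a).1 ha.2⟩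
  have hSperm : S.Perm (d.keys.filter (fun c => !(canonicalCodes.contains c))) :=
    PySem.List.sorted_perm _ _ _
  have hSmem : ∀ a ∈ S, ¬ a ∈ canonicalCodes ∧ a ∈ d.keys := by
    intro a ha
    have := List.mem_filter.mp (hSperm.mem_iff.mp ha)
    refine ⟨?_, this.1⟩
    simpa using this.2
  have hFnd : F.Nodup := List.Nodup.filter _ (by decide)
  have hKnd : (d.keys.filter (fun k => canonicalCodes.contains k)).Nodup :=
    List.Nodup.filter _ hnd2
  have hFperm : F.Perm (d.keys.filter (fun k => canonicalCodes.contains k)) := by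
    rw [List.perm_ext_iff_of_nodup hFnd hKnd]
    intro a
    rw [hF]
    simp only [List.mem_filter]
    constructor
    · rintro ⟨h1, h2⟩
      exact ⟨(PySem.Dict.contains_iff_mem_keys d a).1 h2, by simpa using h1⟩
    · rintro ⟨h1, h2⟩
      exact ⟨by simpa using h2, (PySem.Dict.contains_iff_mem_keys d a).2 h1⟩
  apply PySem.List.sorted_eq_of_perm_of_pairwise_lt
  · rw [PySem.Dict.values_eq_map_keys d hnd2 [], ← List.map_append]
    exact List.Perm.map g ((hFperm.append hSperm).trans (List.filter_append_perm _ _))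
  · rw [List.pairwise_append]
    refine ⟨?_, ?_, ?_⟩
    · rw [List.pairwise_map]
      have base : F.Pairwise (fun a b => rankDict.getD a 999 < rankDict.getD b 999) := by
        rw [hF]
        exact List.Pairwise.sublist List.filter_sublist canon_rank_pairwise
      refine base.imp_of_mem ?_
      intro a b ha hb hr
      rw [Prod.Lex.lt_iff]
      simp only [ofLex_toLex]
      rw [hg a (hFmem a ha).2, hg b (hFmem b hb).2]
      exact Or.inl hr
    · rw [List.pairwise_map]
      have hle : S.Pairwise (fun a b => a ≤ b) := PySem.List.sorted_pairwise _ _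
      have hnodup : S.Nodup := hSperm.nodup_iff.2 (List.Nodup.filter _ hnd2)
      have hlt : S.Pairwise (fun a b => a < b) :=
        (hle.and hnodup).imp (fun h => lt_of_le_of_ne h.1 h.2)
      refine hlt.imp_of_mem ?_
      intro a b ha hb hr
      rw [Prod.Lex.lt_iff]
      simp only [ofLex_toLex]
      rw [hg a (hSmem a ha).2, hg b (hSmem b hb).2,
        rank_not_canon (hSmem a ha).1, rank_not_canon (hSmem b hb).1]
      exact Or.inr ⟨rfl, hr⟩
    · intro x hx y hy
      obtain ⟨a, ha, rfl⟩ := List.mem_map.1 hx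
      obtain ⟨b, hb, rfl⟩ := List.mem_map.1 hy
      rw [Prod.Lex.lt_iff]
      simp only [ofLex_toLex]
      rw [hg a (hFmem a ha).2, hg b (hSmem b hb).2, rank_not_canon (hSmem b hb).1]
      exact Or.inl (rank_canon (hFmem a ha).1)


-- ===== VERDICT (by name: the statement is the Claim_ definition above) =====
theorem normalize_sectors_list_spec : Claim_equal_normalize_sectors_list := by
  intro sectors _
  exact main_eq sectors
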